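-- pv_equiv track=rewrite | github.com/terraref/extractors-3dscanner | panicle_detection/panicle_detection.py | sort_box_range
-- ===== SOURCE A (Python) =====
-- def sort_box_range(plotList, boxList):
--
--     merge_box_list = [[] for i in range(32)]
--     plot_boundary_list = []
--
--     ind = 0
--     for box in boxList:
--         plotNum = plotList[ind]
--         ind += 1
--
--         list_ind = plotNum - 257
--         merge_box_list[list_ind].append(box)
--
--     for boxes in merge_box_list:
--         ymin = 10000000
--         ymax = 0
--         for box in boxes:
--             if ymin > box[1]:
--                 ymin = box[1]
--             if ymax < box[3]:
--                 ymax = box[3]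
--
--         if ymin > ymax:
--             plot_boundary_list.append([0,0])
--         else:
--             plot_boundary_list.append([ymin, ymax])
--
--     return plot_boundary_list
-- ===== SOURCE B (Python) =====
-- def sort_box_range(plotList, boxList):
--     ymin = [10000000] * 32
--     ymax = [0] * 32
--     for ind, box in enumerate(boxList):
--         idx = plotList[ind] - 257
--         if box[1] < ymin[idx]:
--             ymin[idx] = box[1]
--         if box[3] > ymax[idx]:
--             ymax[idx] = box[3]
--     return [[0, 0] if ymin[i] > ymax[i] else [ymin[i], ymax[i]] for i in range(32)]
-- ===== Notes on version B (the rewrite author's own statement) =====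
-- stated objective: simpler
-- what changed: Drops the 32-bucket list-of-boxes grouping and its second reduce pass: B keeps running ymin/ymax arrays and updates them in one pass over boxList, then emits the 32 ranges directly.
import Mathlib
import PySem

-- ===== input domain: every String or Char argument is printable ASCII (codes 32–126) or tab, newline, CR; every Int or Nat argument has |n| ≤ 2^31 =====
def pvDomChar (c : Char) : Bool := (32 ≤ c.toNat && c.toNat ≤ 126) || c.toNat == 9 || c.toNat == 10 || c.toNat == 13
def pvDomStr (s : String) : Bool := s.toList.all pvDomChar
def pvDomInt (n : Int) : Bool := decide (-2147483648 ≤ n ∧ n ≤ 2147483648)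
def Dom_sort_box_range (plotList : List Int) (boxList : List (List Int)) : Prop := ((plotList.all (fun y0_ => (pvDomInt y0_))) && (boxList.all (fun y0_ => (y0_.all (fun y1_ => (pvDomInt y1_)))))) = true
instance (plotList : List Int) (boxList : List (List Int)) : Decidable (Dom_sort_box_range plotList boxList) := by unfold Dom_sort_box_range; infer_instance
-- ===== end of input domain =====

-- B replaces A's bucket-then-reduce two-pass scheme by a single pass with running ymin/ymax arrays (objective: simpler).

-- ===== PORT A =====
-- first loop of A: group boxes into merge_box_list by plotList[ind]-257 (Python indexing, so negative in-range indices wrap)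
def pvStepA (plotList : List Int) (st : List (List (List Int)) × Int) (box : List Int) : List (List (List Int)) × Int :=
  let plotNum := PySem.List.pyGetD plotList st.2 0
  let listInd := plotNum - 257
  (PySem.List.pySetD st.1 listInd (PySem.List.pyGetD st.1 listInd [] ++ [box]), st.2 + 1)

-- inner loop of A's second pass: running (ymin, ymax) over one bucket
def pvReduceStep (st : Int × Int) (box : List Int) : Int × Int :=
  let mn := if st.1 > PySem.List.pyGetD box 1 0 then PySem.List.pyGetD box 1 0 else st.1
  let mx := if st.2 < PySem.List.pyGetD box 3 0 then PySem.List.pyGetD box 3 0 else st.2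
  (mn, mx)

def sort_box_range (plotList : List Int) (boxList : List (List Int)) : List (List Int) :=
  let merge := (boxList.foldl (pvStepA plotList) (List.replicate 32 [], 0)).1
  merge.foldl (fun acc boxes =>
    let r := boxes.foldl pvReduceStep (10000000, 0)
    acc ++ [if r.1 > r.2 then [0, 0] else [r.1, r.2]]) []

-- ===== PORT B =====
-- B's single pass: update the running ymin/ymax arrays in place at slot plotList[ind]-257
def pvStepB (plotList : List Int) (st : List Int × List Int) (p : Int × List Int) : List Int × List Int :=
  let idx := PySem.List.pyGetD plotList p.1 0 - 257
  let b1 := PySem.List.pyGetD p.2 1 0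
  let b3 := PySem.List.pyGetD p.2 3 0
  let mn := if b1 < PySem.List.pyGetD st.1 idx 0 then PySem.List.pySetD st.1 idx b1 else st.1
  let mx := if b3 > PySem.List.pyGetD st.2 idx 0 then PySem.List.pySetD st.2 idx b3 else st.2
  (mn, mx)

def sort_box_range_alt (plotList : List Int) (boxList : List (List Int)) : List (List Int) :=
  let st := (PySem.List.enumerate boxList 0).foldl (pvStepB plotList) (List.replicate 32 10000000, List.replicate 32 0)
  (PySem.List.pyRange 0 32 1).map (fun i =>
    if PySem.List.pyGetD st.1 i 0 > PySem.List.pyGetD st.2 i 0 then [0, 0]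
    else [PySem.List.pyGetD st.1 i 0, PySem.List.pyGetD st.2 i 0])

-- ===== PRECONDITION & SPEC =====
-- Pre_ excludes exactly the inputs on which A raises: a plotList shorter than boxList (IndexError on
-- plotList[ind]), a plot number whose offset plotNum-257 is outside Python's valid index range
-- [-32, 32) for the 32-slot list (IndexError), and a box with fewer than 4 entries (IndexError on box[3]).
def Pre_sort_box_range (plotList : List Int) (boxList : List (List Int)) : Prop :=
  boxList.length ≤ plotList.length ∧
  (∀ p ∈ plotList.take boxList.length, 225 ≤ p ∧ p ≤ 288) ∧
  (∀ b ∈ boxList, 4 ≤ b.length)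
instance (plotList : List Int) (boxList : List (List Int)) : Decidable (Pre_sort_box_range plotList boxList) := by unfold Pre_sort_box_range; infer_instance

def pvWitness_sort_box_range : List Int × List (List Int) := ([257, 260, 257], [[0, 5, 0, 9], [1, 2, 3, 4], [7, -3, 2, 11]])

def Spec_sort_box_range (plotList : List Int) (boxList : List (List Int)) (out : List (List Int)) : Prop := out = sort_box_range_alt plotList boxList
instance (plotList : List Int) (boxList : List (List Int)) (out : List (List Int)) : Decidable (Spec_sort_box_range plotList boxList out) := by unfold Spec_sort_box_range; infer_instance

-- ===== CLAIM (what is proved, stated in full; the proofs are below) =====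
def Claim_equal_sort_box_range : Prop := ∀ (plotList : List Int) (boxList : List (List Int)), Dom_sort_box_range plotList boxList → Pre_sort_box_range plotList boxList → Spec_sort_box_range plotList boxList (sort_box_range plotList boxList)

-- ===== LEMMAS AND PROOFS =====

lemma pvIdx_lt {n : Nat} {i : Int} {k : Nat} (h : PySem.List.pyIdx? n i = some k) : k < n := by
  unfold PySem.List.pyIdx? at h
  split_ifs at h <;> simp_all <;> omega

lemma pvSetD_none {α : Type} {xs : List α} {i : Int} (v : α)
    (h : PySem.List.pyIdx? xs.length i = none) : PySem.List.pySetD xs i v = xs := by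
  simp [PySem.List.pySetD, PySem.List.pySet?, h]

lemma pvSetD_some {α : Type} {xs : List α} {i : Int} {k : Nat} (v : α)
    (h : PySem.List.pyIdx? xs.length i = some k) : PySem.List.pySetD xs i v = xs.set k v := by
  simp [PySem.List.pySetD, PySem.List.pySet?, h]

lemma pvGetD_some {α : Type} {xs : List α} {i : Int} {k : Nat} (d : α)
    (h : PySem.List.pyIdx? xs.length i = some k) : PySem.List.pyGetD xs i d = xs.getD k d := by
  simp [PySem.List.pyGetD, PySem.List.pyGet?, h, List.getD]

lemma pvGetD_set {α : Type} (xs : List α) (k i : Nat) (v d : α) (hk : k < xs.length) :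
    (xs.set k v).getD i d = if k = i then v else xs.getD i d := by
  simp only [List.getD, List.getElem?_set]
  split_ifs <;> simp_all

-- the invariant: B's running arrays hold exactly the reduce of A's partial buckets
lemma pvMain (bs : List (List Int)) (pl : List Int) :
    ∀ (k : Int) (m : List (List (List Int))) (mn mx : List Int),
    m.length = 32 → mn.length = 32 → mx.length = 32 →
    (∀ i : Nat, i < 32 →
      ((mn.getD i 0, mx.getD i 0) : Int × Int) = (m.getD i []).foldl pvReduceStep (10000000, 0)) →
    (bs.foldl (pvStepA pl) (m, k)).1.length = 32 ∧
    ((PySem.List.enumerate bs k).foldl (pvStepB pl) (mn, mx)).1.length = 32 ∧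
    ((PySem.List.enumerate bs k).foldl (pvStepB pl) (mn, mx)).2.length = 32 ∧
    (∀ i : Nat, i < 32 →
      ((((PySem.List.enumerate bs k).foldl (pvStepB pl) (mn, mx)).1.getD i 0,
        ((PySem.List.enumerate bs k).foldl (pvStepB pl) (mn, mx)).2.getD i 0) : Int × Int)
        = (((bs.foldl (pvStepA pl) (m, k)).1.getD i []).foldl pvReduceStep (10000000, 0))) := by
  induction bs with
  | nil => intro k m mn mx hm hmn hmx hinv; exact ⟨hm, hmn, hmx, hinv⟩
  | cons b t ih =>
    intro k m mn mx hm hmn hmx hinv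
    have hen : PySem.List.enumerate (b :: t) k = (k, b) :: PySem.List.enumerate t (k + 1) := rfl
    rw [hen]
    simp only [List.foldl_cons]
    -- one step
    set j : Int := PySem.List.pyGetD pl k 0 - 257 with hj
    have hstepA : pvStepA pl (m, k) b
        = (PySem.List.pySetD m j (PySem.List.pyGetD m j [] ++ [b]), k + 1) := rfl
    have hstepB : pvStepB pl (mn, mx) (k, b)
        = (if PySem.List.pyGetD b 1 0 < PySem.List.pyGetD mn j 0 then PySem.List.pySetD mn j (PySem.List.pyGetD b 1 0) else mn,
           if PySem.List.pyGetD b 3 0 > PySem.List.pyGetD mx j 0 then PySem.List.pySetD mx j (PySem.List.pyGetD b 3 0) else mx) := rfl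
    rw [hstepA, hstepB]
    cases hidx : PySem.List.pyIdx? 32 j with
    | none =>
      have h1 : PySem.List.pySetD m j (PySem.List.pyGetD m j [] ++ [b]) = m := pvSetD_none _ (by rw [hm]; exact hidx)
      have h2 : PySem.List.pySetD mn j (PySem.List.pyGetD b 1 0) = mn := pvSetD_none _ (by rw [hmn]; exact hidx)
      have h3 : PySem.List.pySetD mx j (PySem.List.pyGetD b 3 0) = mx := pvSetD_none _ (by rw [hmx]; exact hidx)
      rw [h1, h2, h3]
      have e2 : (if PySem.List.pyGetD b 1 0 < PySem.List.pyGetD mn j 0 then mn else mn) = mn := by split <;> rfl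
      have e3 : (if PySem.List.pyGetD b 3 0 > PySem.List.pyGetD mx j 0 then mx else mx) = mx := by split <;> rfl
      rw [e2, e3]
      exact ih (k + 1) m mn mx hm hmn hmx hinv
    | some tt =>
      have htt : tt < 32 := pvIdx_lt hidx
      have hmset : PySem.List.pySetD m j (PySem.List.pyGetD m j [] ++ [b]) = m.set tt (m.getD tt [] ++ [b]) := by
        rw [pvGetD_some [] (by rw [hm]; exact hidx), pvSetD_some _ (by rw [hm]; exact hidx)]
      have hmnget : PySem.List.pyGetD mn j (0 : Int) = mn.getD tt 0 := pvGetD_some _ (by rw [hmn]; exact hidx)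
      have hmxget : PySem.List.pyGetD mx j (0 : Int) = mx.getD tt 0 := pvGetD_some _ (by rw [hmx]; exact hidx)
      have hmnset : PySem.List.pySetD mn j (PySem.List.pyGetD b 1 0) = mn.set tt (PySem.List.pyGetD b 1 0) := pvSetD_some _ (by rw [hmn]; exact hidx)
      have hmxset : PySem.List.pySetD mx j (PySem.List.pyGetD b 3 0) = mx.set tt (PySem.List.pyGetD b 3 0) := pvSetD_some _ (by rw [hmx]; exact hidx)
      rw [hmset, hmnget, hmxget, hmnset, hmxset]
      apply ih
      · rw [List.length_set]; exact hm
      · split <;> simp [List.length_set, hmn]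
      · split <;> simp [List.length_set, hmx]
      · intro i hi
        have hold := hinv tt htt
        by_cases hit : i = tt
        · subst hit
          have hgm : (m.set i (m.getD i [] ++ [b])).getD i ([] : List (List Int)) = m.getD i [] ++ [b] := by
            rw [pvGetD_set m i i _ _ (by omega)]; simp
          rw [hgm, List.foldl_append, ← hinv i hi]
          simp only [List.foldl_cons, List.foldl_nil, pvReduceStep]
          rw [Prod.mk.injEq]
          constructor
          · split_ifs with h1
            · rw [pvGetD_set mn i i _ _ (by omega)]; simp
            · rfl
          · split_ifs with h1
            · rw [pvGetD_set mx i i _ _ (by omega)]; simp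
            · rfl
        · have hgm : (m.set tt (m.getD tt [] ++ [b])).getD i ([] : List (List Int)) = m.getD i [] := by
            rw [pvGetD_set m tt i _ _ (by omega), if_neg (fun h => hit h.symm)]
          rw [hgm, ← hinv i hi]
          rw [Prod.mk.injEq]
          constructor
          · split_ifs with h1
            · rw [pvGetD_set mn tt i _ _ (by omega), if_neg (fun h => hit h.symm)]
            · rfl
          · split_ifs with h1
            · rw [pvGetD_set mx tt i _ _ (by omega), if_neg (fun h => hit h.symm)]
            · rfl

lemma pvFoldlAppend {α β : Type} (f : α → β) (l : List α) :
    ∀ acc : List β, l.foldl (fun acc x => acc ++ [f x]) acc = acc ++ l.map f := by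
  induction l with
  | nil => simp
  | cons x t ih => intro acc; simp [ih]

-- ===== VERDICT (by name: the statement is the Claim_ definition above) =====
theorem sort_box_range_spec : Claim_equal_sort_box_range := by
  intro plotList boxList _ _
  unfold Spec_sort_box_range sort_box_range sort_box_range_alt
  have hmain := pvMain boxList plotList 0 (List.replicate 32 []) (List.replicate 32 10000000) (List.replicate 32 0)
    (by simp) (by simp) (by simp)
    (by intro i hi
        rw [List.getD_replicate _ hi, List.getD_replicate _ hi, List.getD_replicate _ hi]
        rfl)
  obtain ⟨hM, hS1, hS2, hinv⟩ := hmain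
  rw [pvFoldlAppend]
  have hrange : PySem.List.pyRange 0 32 1 = (List.range 32).map Int.ofNat := by rfl
  rw [hrange, List.map_map, List.nil_append]
  apply List.ext_getElem
  · simp only [List.length_map, List.length_range, hM]
  · intro i h1 h2
    have hi : i < 32 := by simpa only [List.length_map, hM] using h1
    have key := hinv i hi
    rw [List.getD_eq_getElem _ _ (by omega), List.getD_eq_getElem _ _ (by omega),
        List.getD_eq_getElem _ _ (by omega)] at key
    have hfst := congrArg Prod.fst key
    have hsnd := congrArg Prod.snd key
    simp only [List.getElem_map, List.getElem_range]
    simp only [Function.comp_apply, Int.ofNat_eq_natCast, PySem.List.pyGetD_natCast]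
    rw [List.getD_eq_getElem _ _ (by rw [hS1]; exact hi), List.getD_eq_getElem _ _ (by rw [hS2]; exact hi)]
    simp only at hfst hsnd
    rw [hfst, hsnd]
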